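-- pv_equiv track=rewrite | github.com/CrayLabs/SmartSim | smartsim/launcher/slurm/slurmParser.py | parse_salloc_error
-- ===== SOURCE A (Python) =====
-- def parse_salloc_error(output):
--     """Parse and return error output of a failed salloc command
--
--     :param output: stderr output of salloc command
--     :type output: str
--     :return: error message
--     :rtype: str
--     """
--     # look for error first
--     for line in output.split("\n"):
--         if line.startswith("salloc: error:"):
--             error = line.split("error:")[1]
--             return error.strip()
--     # if no error line, take first line
--     for line in output.split("\n"):
--         if line.startswith("salloc: "):
--             error = " ".join((line.split()[1:]))
--             return error.strip()
--     # if neither, present a base error message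
--     base_err = "Slurm allocation error"
--     return base_err
-- ===== SOURCE B (Python) =====
-- def parse_salloc_error(output):
--     """Parse and return error output of a failed salloc command (single pass)."""
--     first_generic = None
--     for line in output.split("\n"):
--         if line.startswith("salloc: error:"):
--             return line.split("error:")[1].strip()
--         if first_generic is None and line.startswith("salloc: "):
--             first_generic = " ".join(line.split()[1:]).strip()
--     if first_generic is not None:
--         return first_generic
--     return "Slurm allocation error"
-- ===== Notes on version B (the rewrite author's own statement) =====
-- stated objective: simpler
-- what changed: Replaces A's two full scans of the split lines (one for error lines, one for generic salloc lines) with a single pass that returns eagerly on an error line and remembers only the first generic line.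
import Mathlib
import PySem

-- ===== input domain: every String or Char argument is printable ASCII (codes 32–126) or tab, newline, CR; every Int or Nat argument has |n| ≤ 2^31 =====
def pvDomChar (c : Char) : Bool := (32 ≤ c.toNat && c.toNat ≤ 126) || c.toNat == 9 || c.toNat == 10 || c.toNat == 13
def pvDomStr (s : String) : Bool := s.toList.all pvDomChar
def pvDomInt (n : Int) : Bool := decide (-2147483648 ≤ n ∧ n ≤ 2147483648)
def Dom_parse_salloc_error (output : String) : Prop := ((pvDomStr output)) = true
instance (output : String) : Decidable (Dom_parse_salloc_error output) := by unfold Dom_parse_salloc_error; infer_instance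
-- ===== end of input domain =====

-- B replaces A's two scans of the split lines with one pass holding the first generic
-- salloc line in an accumulator; simpler, same return value.


-- s.split(sep) for a nonempty literal sep (split? is none only for sep = "")
def pvSplitLines (s : String) : List String := (PySem.Str.split? s "\n").getD []

-- shared message extractors: both Pythons contain these exact expressions
-- line.split("error:")[1].strip()  (the guard guarantees index 1 exists, so getD "" is never used)
def pvErrMsg (line : String) : String :=
  PySem.Str.strip ((PySem.List.pyGet? ((PySem.Str.split? line "error:").getD []) 1).getD "")
-- " ".join(line.split()[1:]).strip()
def pvGenMsg (line : String) : String :=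
  PySem.Str.strip (PySem.Str.join " " (PySem.List.slice (PySem.Str.split₀ line) (some 1) none))

-- ===== PORT A =====
-- first loop: look for an error line
def pvLoop1 : List String → Option String
  | [] => none
  | line :: rest =>
    if PySem.Str.startswith line "salloc: error:" then some (pvErrMsg line)
    else pvLoop1 rest

-- second loop: first generic "salloc: " line
def pvLoop2 : List String → Option String
  | [] => none
  | line :: rest =>
    if PySem.Str.startswith line "salloc: " then some (pvGenMsg line)
    else pvLoop2 rest

def parse_salloc_error (output : String) : String :=
  match pvLoop1 (pvSplitLines output) with
  | some e => e
  | none =>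
    match pvLoop2 (pvSplitLines output) with
    | some e => e
    | none => "Slurm allocation error"

-- ===== PORT B =====
-- single pass: return eagerly on an error line, remember the first generic line
def pvScan : List String → Option String → String
  | [], firstGeneric => firstGeneric.getD "Slurm allocation error"
  | line :: rest, firstGeneric =>
    if PySem.Str.startswith line "salloc: error:" then pvErrMsg line
    else
      pvScan rest
        (if firstGeneric.isNone && PySem.Str.startswith line "salloc: " then
          some (pvGenMsg line)
        else firstGeneric)

def parse_salloc_error_alt (output : String) : String :=
  pvScan (pvSplitLines output) none

-- ===== PRECONDITION & SPEC =====
def Spec_parse_salloc_error (output : String) (out : String) : Prop := out = parse_salloc_error_alt output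
instance (output : String) (out : String) : Decidable (Spec_parse_salloc_error output out) := by unfold Spec_parse_salloc_error; infer_instance

-- ===== CLAIM (what is proved, stated in full; the proofs are below) =====
def Claim_equal_parse_salloc_error : Prop := ∀ (output : String), Dom_parse_salloc_error output → Spec_parse_salloc_error output (parse_salloc_error output)

-- ===== LEMMAS AND PROOFS =====
-- the single pass with accumulator equals: error search, else the accumulator, else the generic search
theorem pvScan_eq (lines : List String) (fg : Option String) :
    pvScan lines fg =
      match pvLoop1 lines with
      | some e => e
      | none =>
        match fg with
        | some g => g
        | none => (pvLoop2 lines).getD "Slurm allocation error" := by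
  induction lines generalizing fg with
  | nil => cases fg <;> simp [pvScan, pvLoop1, pvLoop2, Option.getD]
  | cons line rest ih =>
    by_cases he : PySem.Str.startswith line "salloc: error:" = true
    all_goals simp [PySem.Str.startswith_eq] at he
    · simp [pvScan, pvLoop1, he]
    · cases fg with
      | some g => simp [pvScan, pvLoop1, he, ih]
      | none =>
        by_cases hg : PySem.Str.startswith line "salloc: " = true <;>
          simp [PySem.Str.startswith_eq] at hg <;>
          simp [pvScan, pvLoop1, pvLoop2, he, hg, ih]

-- ===== VERDICT (by name: the statement is the Claim_ definition above) =====
theorem parse_salloc_error_spec : Claim_equal_parse_salloc_error := by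
  intro output _
  unfold Spec_parse_salloc_error parse_salloc_error parse_salloc_error_alt
  rw [pvScan_eq]
  cases pvLoop1 (pvSplitLines output) <;> cases pvLoop2 (pvSplitLines output) <;> rfl
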